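-- pv_equiv track=rewrite | github.com/pypi-data/pypi-mirror-9 | packages/skoolkit/skoolkit-4.3.tar.gz/skoolkit-4.3/skoolkit/skoolparser.py | get_defw_length
-- ===== SOURCE A (Python) =====
-- FORMAT_NO_BASE = {
--     'b': 'b{}',
--     'd': '{}',
--     'h': '{}'
-- }
--
-- FORMAT_PRESERVE_BASE = {
--     'b': 'b{}',
--     'd': 'd{}',
--     'h': 'h{}'
-- }
--
-- def _get_base(item, preserve_base):
--     if item.startswith('%'):
--         return 'b'
--     if item.startswith('$') and preserve_base:
--         return 'h'
--     return 'd'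
--
-- def get_defw_length(item_str, preserve_base):
--     if preserve_base:
--         word_fmt = FORMAT_PRESERVE_BASE
--     else:
--         word_fmt = FORMAT_NO_BASE
--     full_length = 0
--     lengths = []
--     length = 0
--     prev_base = None
--     for item in item_str.split(','):
--         item = item.strip()
--         cur_base = _get_base(item, preserve_base)
--         if prev_base != cur_base and length:
--             lengths.append(word_fmt[prev_base].format(length))
--             full_length += length
--             length = 0
--         length += 2
--         prev_base = cur_base
--     lengths.append(word_fmt[prev_base].format(length))
--     full_length += length
--     return full_length, ':'.join(lengths)
-- ===== SOURCE B (Python) =====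
-- FORMAT_NO_BASE = {
--     'b': 'b{}',
--     'd': '{}',
--     'h': '{}'
-- }
--
-- FORMAT_PRESERVE_BASE = {
--     'b': 'b{}',
--     'd': 'd{}',
--     'h': 'h{}'
-- }
--
-- def _get_base(item, preserve_base):
--     if item.startswith('%'):
--         return 'b'
--     if item.startswith('$') and preserve_base:
--         return 'h'
--     return 'd'
--
-- def get_defw_length(item_str, preserve_base):
--     word_fmt = FORMAT_PRESERVE_BASE if preserve_base else FORMAT_NO_BASE
--     # phase 1: map every item to its base
--     bases = [_get_base(it.strip(), preserve_base) for it in item_str.split(',')]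
--     # phase 2: group maximal consecutive runs, built back-to-front
--     runs = []  # built back-to-front: current (leftmost) run lives at runs[-1]
--     for b in reversed(bases):
--         if runs and runs[-1][0] == b:
--             runs[-1] = (b, runs[-1][1] + 1)
--         else:
--             runs.append((b, 1))
--     runs.reverse()
--     lengths = [word_fmt[b].format(2 * n) for b, n in runs]
--     return 2 * len(bases), ':'.join(lengths)
-- ===== Notes on version B (the rewrite author's own statement) =====
-- stated objective: alternative
-- what changed: Replaces A's single-pass accumulate-and-flush state machine (prev_base/length/full_length mutated per item) with a two-phase map-then-group decomposition: first map every item to its base, then group maximal consecutive runs (built back-to-front) and format each run; full length is just 2*len(bases).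
import Mathlib
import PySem

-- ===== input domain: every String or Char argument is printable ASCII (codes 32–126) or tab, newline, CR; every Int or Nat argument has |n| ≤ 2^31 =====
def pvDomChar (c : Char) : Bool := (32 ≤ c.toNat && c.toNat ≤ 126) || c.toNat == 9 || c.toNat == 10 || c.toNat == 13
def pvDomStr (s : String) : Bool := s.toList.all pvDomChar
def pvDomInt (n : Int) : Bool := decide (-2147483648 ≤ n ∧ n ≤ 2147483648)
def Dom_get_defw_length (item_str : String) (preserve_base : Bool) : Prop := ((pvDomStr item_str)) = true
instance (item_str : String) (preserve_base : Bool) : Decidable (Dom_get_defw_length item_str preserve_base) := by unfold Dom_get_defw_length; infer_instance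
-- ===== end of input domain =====

-- B replaces A's accumulate-and-flush state machine with a map-to-bases then group-consecutive-runs
-- decomposition (objective: alternative, same cost).


-- ===== PORT A =====
-- _get_base(item, preserve_base); bases are the one-character strings 'b'/'d'/'h', modelled as Char
def pvGetBase (item : List Char) (preserve_base : Bool) : Char :=
  if PySem.Chars.startswith item ['%'] then 'b'
  else if PySem.Chars.startswith item ['$'] && preserve_base then 'h'
  else 'd'

-- word_fmt[base].format(n): FORMAT_PRESERVE_BASE prefixes the base letter for all three keys,
-- FORMAT_NO_BASE only for 'b'
def pvFmt (preserve_base : Bool) (base : Char) (n : Int) : List Char :=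
  if preserve_base then base :: PySem.Int.toChars n
  else if base = 'b' then 'b' :: PySem.Int.toChars n
  else PySem.Int.toChars n

-- A's for-loop, state (full_length, lengths, length, prev_base); prev_base=None → Option.none.
-- (word_fmt[prev_base] with prev_base None is unreachable in A: the flush needs length ≠ 0;
-- the port reads it with .getD 'd' there.)
def pvLoopA (preserve_base : Bool) :
    List (List Char) → Int × List (List Char) × Int × Option Char →
    Int × List (List Char) × Int × Option Char
  | [], st => st
  | item :: rest, (fl, ls, len, prev) =>
    let item := PySem.Chars.strip item
    let cur := pvGetBase item preserve_base
    if prev ≠ some cur ∧ len ≠ 0 then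
      -- flush (length becomes 0), then length += 2
      pvLoopA preserve_base rest
        (fl + len, ls ++ [pvFmt preserve_base (prev.getD 'd') len], 0 + 2, some cur)
    else
      pvLoopA preserve_base rest (fl, ls, len + 2, some cur)

def get_defw_length (item_str : String) (preserve_base : Bool) : Int × String :=
  let items := PySem.Chars.splitOn item_str.toList [',']
  match pvLoopA preserve_base items (0, [], 0, none) with
  | (fl, ls, len, prev) =>
    let ls := ls ++ [pvFmt preserve_base (prev.getD 'd') len]
    (fl + len, String.ofList (PySem.Chars.join [':'] ls))

-- ===== PORT B =====
-- Source B's run-grouping loop over reversed(bases). Python keeps `runs` with the current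
-- (leftmost) run at runs[-1] and reverses at the end; the port keeps that list already
-- reversed (current run at the head), so the final `runs.reverse()` is the identity here.
def pvRunStep (runs : List (Char × Int)) (b : Char) : List (Char × Int) :=
  match runs with
  | (c, m) :: rest => if c = b then (b, m + 1) :: rest else (b, 1) :: (c, m) :: rest
  | [] => [(b, 1)]

def pvGroupRuns (bases : List Char) : List (Char × Int) :=
  bases.reverse.foldl pvRunStep []

def get_defw_length_alt (item_str : String) (preserve_base : Bool) : Int × String :=
  let bases := (PySem.Chars.splitOn item_str.toList [',']).map
    (fun it => pvGetBase (PySem.Chars.strip it) preserve_base)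
  let lengths := (pvGroupRuns bases).map (fun r => pvFmt preserve_base r.1 (2 * r.2))
  (2 * (bases.length : Int), String.ofList (PySem.Chars.join [':'] lengths))

-- ===== PRECONDITION & SPEC =====
def Spec_get_defw_length (item_str : String) (preserve_base : Bool) (out : Int × String) : Prop := out = get_defw_length_alt item_str preserve_base
instance (item_str : String) (preserve_base : Bool) (out : Int × String) : Decidable (Spec_get_defw_length item_str preserve_base out) := by unfold Spec_get_defw_length; infer_instance

-- ===== CLAIM (what is proved, stated in full; the proofs are below) =====
def Claim_equal_get_defw_length : Prop := ∀ (item_str : String) (preserve_base : Bool), Dom_get_defw_length item_str preserve_base → Spec_get_defw_length item_str preserve_base (get_defw_length item_str preserve_base)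

-- ===== LEMMAS AND PROOFS =====

-- splitOn never returns the empty list (Python's str.split(',') always yields ≥ 1 piece)
theorem pv_splitOn_go_ne_nil (sep : List Char) (fuel : Nat) :
    ∀ (l cur : List Char) (acc : List (List Char)),
      PySem.Chars.splitOn.go sep fuel l cur acc ≠ [] := by
  induction fuel with
  | zero => intro l cur acc; simp [PySem.Chars.splitOn.go]
  | succ n ih =>
    intro l cur acc
    cases l with
    | nil => simp [PySem.Chars.splitOn.go]
    | cons c rest =>
      rw [PySem.Chars.splitOn.go]
      split
      · exact ih _ _ _
      · exact ih _ _ _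

theorem pv_splitOn_ne_nil (s sep : List Char) : PySem.Chars.splitOn s sep ≠ [] :=
  pv_splitOn_go_ne_nil sep _ s [] []

-- merging a new run of weight m onto the front of a run list
def pvMerge (p : Char) (m : Int) (rs : List (Char × Int)) : List (Char × Int) :=
  match rs with
  | (c, mm) :: rest => if c = p then (p, m + mm) :: rest else (p, m) :: (c, mm) :: rest
  | [] => [(p, m)]

theorem pvRunStep_eq_merge (rs : List (Char × Int)) (b : Char) :
    pvRunStep rs b = pvMerge b 1 rs := by
  cases rs with
  | nil => rfl
  | cons h t =>
    obtain ⟨c, mm⟩ := h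
    simp only [pvRunStep, pvMerge]
    split_ifs <;> simp [add_comm]

theorem pvGroupRuns_cons (b : Char) (bs : List Char) :
    pvGroupRuns (b :: bs) = pvMerge b 1 (pvGroupRuns bs) := by
  simp [pvGroupRuns, List.foldl_append, pvRunStep_eq_merge]

theorem pvMerge_merge_same (p : Char) (m : Int) (rs : List (Char × Int)) :
    pvMerge p m (pvMerge p 1 rs) = pvMerge p (m + 1) rs := by
  cases rs with
  | nil => simp [pvMerge]
  | cons h t =>
    obtain ⟨c, mm⟩ := h
    simp only [pvMerge]
    split_ifs with h1 <;> simp_all <;> ring_nf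

theorem pvMerge_merge_ne (p b : Char) (hpb : b ≠ p) (m : Int) (rs : List (Char × Int)) :
    pvMerge p m (pvMerge b 1 rs) = (p, m) :: pvMerge b 1 rs := by
  cases rs with
  | nil => simp [pvMerge, hpb]
  | cons h t =>
    obtain ⟨c, mm⟩ := h
    simp only [pvMerge]
    split_ifs <;> simp_all

def pvBaseOf (preserve_base : Bool) (it : List Char) : Char :=
  pvGetBase (PySem.Chars.strip it) preserve_base

-- the final flush A performs after the loop, applied to a loop state
def pvFinish (preserve_base : Bool) (st : Int × List (List Char) × Int × Option Char) :
    Int × List (List Char) :=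
  (st.1 + st.2.2.1, st.2.1 ++ [pvFmt preserve_base (st.2.2.2.getD 'd') st.2.2.1])

-- the invariant of A's loop: from a live state (length = 2(k+1), prev = p) the finished loop
-- produces the run decomposition of p^(k+1) followed by the bases of the remaining items
theorem pvLoopA_runs (preserve_base : Bool) :
    ∀ (its : List (List Char)) (fl : Int) (ls : List (List Char)) (k : Nat) (p : Char),
      pvFinish preserve_base (pvLoopA preserve_base its (fl, ls, 2 * ((k : Int) + 1), some p))
      = (fl + 2 * ((k : Int) + 1) + 2 * its.length,
         ls ++ (pvMerge p ((k : Int) + 1)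
             (pvGroupRuns (its.map (pvBaseOf preserve_base)))).map
           (fun r => pvFmt preserve_base r.1 (2 * r.2))) := by
  intro its
  induction its with
  | nil =>
    intro fl ls k p
    simp [pvLoopA, pvFinish, pvGroupRuns, pvMerge]
  | cons item rest ih =>
    intro fl ls k p
    simp only [pvLoopA, List.map_cons, pvGroupRuns_cons]
    by_cases hb : pvGetBase (PySem.Chars.strip item) preserve_base = p
    · -- same base: no flush
      have hcond : ¬ ((some p ≠ some (pvGetBase (PySem.Chars.strip item) preserve_base)) ∧
          (2 * ((k : Int) + 1) ≠ 0)) := by simp [hb]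
      rw [if_neg hcond]
      have h2 : (2 * ((k : Int) + 1) + 2) = 2 * (((k + 1 : Nat) : Int) + 1) := by push_cast; ring
      rw [h2, ih]
      rw [pvBaseOf, hb, pvMerge_merge_same]
      have h3 : ((k : Int) + 1 + 1) = (((k + 1 : Nat) : Int) + 1) := by push_cast; ring
      rw [h3]
      refine Prod.ext (by push_cast [List.length_cons]; ring) rfl
    · -- base changes: flush the current run
      have hcond : ((some p ≠ some (pvGetBase (PySem.Chars.strip item) preserve_base)) ∧
          (2 * ((k : Int) + 1) ≠ 0)) := by
        constructor
        · simp [Ne.symm hb]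
        · positivity
      rw [if_pos hcond]
      have h2 : ((0 : Int) + 2) = 2 * (((0 : Nat) : Int) + 1) := by norm_num
      rw [h2, ih]
      rw [pvBaseOf, pvMerge_merge_ne p _ hb]
      refine Prod.ext (by push_cast [List.length_cons]; ring)
        (by simp only [Option.getD_some, List.map_cons, List.append_assoc, List.cons_append,
              List.nil_append, Nat.cast_zero, zero_add])

-- ===== VERDICT (by name: the statement is the Claim_ definition above) =====
theorem get_defw_length_spec : Claim_equal_get_defw_length := by
  intro item_str preserve_base _
  unfold Spec_get_defw_length get_defw_length get_defw_length_alt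
  cases hsp : PySem.Chars.splitOn item_str.toList [','] with
  | nil => exact absurd hsp (pv_splitOn_ne_nil _ _)
  | cons i rest =>
    simp only [pvLoopA]
    have hcond : ¬ (((none : Option Char) ≠ some (pvGetBase (PySem.Chars.strip i) preserve_base)) ∧
        ((0 : Int) ≠ 0)) := by simp
    rw [if_neg hcond]
    have h2 : ((0 : Int) + 2) = 2 * (((0 : Nat) : Int) + 1) := by norm_num
    rw [h2]
    have hrun := pvLoopA_runs preserve_base rest 0 []
      0 (pvGetBase (PySem.Chars.strip i) preserve_base)
    rcases hlp : pvLoopA preserve_base rest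
        (0, [], 2 * (((0 : Nat) : Int) + 1),
          some (pvGetBase (PySem.Chars.strip i) preserve_base)) with ⟨fl', ls', len', prev'⟩
    rw [hlp] at hrun
    simp only [pvFinish, Prod.mk.injEq] at hrun
    obtain ⟨hfl, hls⟩ := hrun
    simp only [Prod.mk.injEq]
    constructor
    · rw [hfl]
      push_cast [List.length_map, List.length_cons]; ring
    · rw [hls]
      simp only [List.map_cons, pvGroupRuns_cons, List.nil_append, Nat.cast_zero, zero_add]
      rfl
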